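-- pv_equiv track=rewrite | github.com/ckoons/BubbleSpacetimeTheory | play/toy_982_sector_predictions_new_territory.py | factorize_7smooth
-- ===== SOURCE A (Python) =====
-- def factorize_7smooth(n):
--     """Return dict of exponents {prime: exponent} for a 7-smooth number."""
--     if n <= 0:
--         return None
--     if n == 1:
--         return {}
--     factors = {}
--     rem = n
--     for p in [2, 3, 5, 7]:
--         while rem % p == 0:
--             factors[p] = factors.get(p, 0) + 1
--             rem //= p
--     if rem != 1:
--         return None
--     return factors
-- ===== SOURCE B (Python) =====
-- def factorize_7smooth(n):
--     """Return dict of exponents {prime: exponent} for a 7-smooth number."""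
--     if n <= 0:
--         return None
--     rem, layers = n, []
--     while True:
--         g = 1
--         for p in (2, 3, 5, 7):
--             if rem % p == 0:
--                 g *= p
--         if g == 1:
--             break
--         layers.append(g)
--         rem //= g
--     if rem != 1:
--         return None
--     return {p: e for p in (2, 3, 5, 7) if (e := sum(g % p == 0 for g in layers))}
-- ===== Notes on version B (the rewrite author's own statement) =====
-- stated objective: alternative
-- what changed: B replaces A's per-prime exhaustive trial division by layer peeling: each round it divides the remainder once by the product of all admissible primes that currently divide it, records that layer product in a list, and after the loop reconstructs each exponent as the number of recorded layers the prime divides, so no per-prime counters are maintained during the loop.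
import Mathlib
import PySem

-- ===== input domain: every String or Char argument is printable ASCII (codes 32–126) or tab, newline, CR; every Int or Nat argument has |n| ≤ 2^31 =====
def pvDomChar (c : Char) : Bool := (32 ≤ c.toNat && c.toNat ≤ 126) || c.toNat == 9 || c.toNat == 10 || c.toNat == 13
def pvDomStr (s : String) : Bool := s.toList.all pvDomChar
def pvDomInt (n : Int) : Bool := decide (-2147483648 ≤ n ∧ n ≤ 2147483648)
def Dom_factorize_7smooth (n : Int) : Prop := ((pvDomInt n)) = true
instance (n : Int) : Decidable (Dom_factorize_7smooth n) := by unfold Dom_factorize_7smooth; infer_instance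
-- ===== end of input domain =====

-- B replaces A's per-prime exhaustive trial division by layer peeling (divide once per round by
-- the product of the primes still dividing the remainder, record the layer products, recover
-- each exponent by counting layers it divides); objective: alternative, same cost.

-- ===== PORT A =====
-- inner 'while rem % p == 0' loop; fuel only guards termination (rem.natAbs is always enough,
-- the loop body is exact step for step)
def pvStripA (p : Int) : Nat → PySem.Dict Int Int × Int → PySem.Dict Int Int × Int
  | 0, st => st
  | f + 1, (factors, rem) =>
    if PySem.Int.mod rem p = 0 then
      pvStripA p f (factors.insert p (factors.getD p 0 + 1), PySem.Int.floordiv rem p)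
    else (factors, rem)

def factorize_7smooth (n : Int) : Option (List (Int × Int)) :=
  if n ≤ 0 then none
  else if n = 1 then some ((PySem.Dict.empty : PySem.Dict Int Int).items)
  else
    let st := [(2 : Int), 3, 5, 7].foldl
      (fun (st : PySem.Dict Int Int × Int) p => pvStripA p st.2.natAbs st)
      (PySem.Dict.empty, n)
    if st.2 ≠ 1 then none else some st.1.items

-- ===== PORT B =====
-- 'g = 1; for p in (2,3,5,7): if rem % p == 0: g *= p'
def pvLayer (rem : Int) : Int :=
  [(2 : Int), 3, 5, 7].foldl (fun g p => if PySem.Int.mod rem p = 0 then g * p else g) 1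

-- the 'while True' loop collecting layer products; fuel only guards termination
-- (n.natAbs is always enough, the body is exact step for step)
def pvRounds : Nat → Int → List Int × Int
  | 0, rem => ([], rem)
  | f + 1, rem =>
    let g := pvLayer rem
    if g = 1 then ([], rem)
    else
      let st := pvRounds f (PySem.Int.floordiv rem g)
      (g :: st.1, st.2)

def factorize_7smooth_alt (n : Int) : Option (List (Int × Int)) :=
  if n ≤ 0 then none
  else
    let st := pvRounds n.natAbs n
    if st.2 ≠ 1 then none
    else
      -- '{p: e for p in (2,3,5,7) if (e := sum(g % p == 0 for g in layers))}'
      some (([(2 : Int), 3, 5, 7].foldl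
        (fun (d : PySem.Dict Int Int) p =>
          let e := st.1.countP (fun g => PySem.Int.mod g p = 0)
          if e ≠ 0 then d.insert p (e : Int) else d)
        PySem.Dict.empty).items)

-- ===== PRECONDITION & SPEC =====
def Spec_factorize_7smooth (n : Int) (out : Option (List (Int × Int))) : Prop := out = factorize_7smooth_alt n
instance (n : Int) (out : Option (List (Int × Int))) : Decidable (Spec_factorize_7smooth n out) := by unfold Spec_factorize_7smooth; infer_instance

-- ===== CLAIM (what is proved, stated in full; the proofs are below) =====
def Claim_equal_factorize_7smooth : Prop := ∀ (n : Int), Dom_factorize_7smooth n → Spec_factorize_7smooth n (factorize_7smooth n)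

-- ===== LEMMAS AND PROOFS =====

-- what A's inner while-loop does to the dict: e insertions at key p
def pvIter (p : Int) : Nat → PySem.Dict Int Int → PySem.Dict Int Int
  | 0, d => d
  | e + 1, d => pvIter p e (d.insert p (d.getD p 0 + 1))

lemma pvIter_closed (p : Int) (e : Nat) (d : PySem.Dict Int Int) :
    pvIter p e d = if e = 0 then d else d.insert p (d.getD p 0 + (e : Int)) := by
  induction e generalizing d with
  | zero => simp [pvIter]
  | succ e ih =>
    rw [pvIter, ih]
    by_cases he : e = 0
    · subst he; simp
    · rw [if_neg he, if_neg (Nat.succ_ne_zero e), PySem.Dict.getD_insert_self,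
        PySem.Dict.insert_insert_self]
      congr 1
      push_cast
      ring

lemma fuel_gt (p : Int) (hp : 2 ≤ p) (r : Int) (hr : 1 ≤ r) (e : Nat) :
    e < (p ^ e * r).natAbs := by
  have h2 : (2 : Int) ^ e ≤ p ^ e * r := by
    calc (2 : Int) ^ e ≤ p ^ e := pow_le_pow_left₀ (by norm_num) hp e
    _ = p ^ e * 1 := (mul_one _).symm
    _ ≤ p ^ e * r := by
      have : (0 : Int) < p ^ e := pow_pos (by omega) e
      exact mul_le_mul_of_nonneg_left hr (le_of_lt this)
  have he : (e : Int) < 2 ^ e := by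
    exact_mod_cast Nat.lt_two_pow_self (n := e)
  omega

lemma pvStripA_spec (p : Int) (hp : 2 ≤ p) (r : Int) (_hr : 1 ≤ r) (hnd : ¬ p ∣ r) :
    ∀ (e : Nat) (fuel : Nat) (d : PySem.Dict Int Int), e < fuel →
      pvStripA p fuel (d, p ^ e * r) = (pvIter p e d, r) := by
  intro e
  induction e with
  | zero =>
    intro fuel d hf
    cases fuel with
    | zero => omega
    | succ f => ?_
    rw [pvStripA]
    rw [if_neg]
    · simp [pvIter]
    · rw [PySem.Int.mod_eq_zero_iff_dvd]
      simpa using hnd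
  | succ e ih =>
    intro fuel d hf
    cases fuel with
    | zero => omega
    | succ f => ?_
    rw [pvStripA]
    have hdvd : p ∣ p ^ (e + 1) * r := Dvd.dvd.mul_right (dvd_pow_self p (Nat.succ_ne_zero e)) r
    rw [if_pos (by rw [PySem.Int.mod_eq_zero_iff_dvd]; exact hdvd)]
    have hstep : PySem.Int.floordiv (p ^ (e + 1) * r) p = p ^ e * r := by
      rw [PySem.Int.floordiv_eq_ediv_of_pos (by omega)]
      rw [pow_succ, mul_comm (p ^ e) p, mul_assoc]
      exact Int.mul_ediv_cancel_left _ (by omega)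
    rw [hstep, ih f _ (Nat.lt_of_succ_lt_succ hf)]
    rfl

-- existence of the p-adic decomposition of a positive integer
lemma exists_decomp (p : Nat) (hp : p.Prime) (m : Int) (hm : 1 ≤ m) :
    ∃ (e : Nat) (r : Int), m = (p : Int) ^ e * r ∧ 1 ≤ r ∧ ¬ ((p : Int) ∣ r) := by
  set M := m.toNat with hM
  have hM0 : M ≠ 0 := by omega
  refine ⟨M.factorization p, ((M / p ^ M.factorization p : Nat) : Int), ?_, ?_, ?_⟩
  · have h1 : p ^ M.factorization p * (M / p ^ M.factorization p) = M :=
      Nat.ordProj_mul_ordCompl_eq_self M p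
    calc m = (M : Int) := by omega
    _ = ((p ^ M.factorization p * (M / p ^ M.factorization p) : Nat) : Int) := by rw [h1]
    _ = (p : Int) ^ M.factorization p * ((M / p ^ M.factorization p : Nat) : Int) := by
      push_cast; ring
  · exact_mod_cast Nat.one_le_iff_ne_zero.mpr (Nat.ordCompl_pos p hM0).ne'
  · intro hdvd
    exact Nat.not_dvd_ordCompl hp hM0 (by exact_mod_cast hdvd)

lemma exp_le_natAbs (p : Int) (hp : 2 ≤ p) (n : Int) (hn : 1 ≤ n) (E : Nat)
    (hd : p ^ E ∣ n) : E ≤ n.natAbs := by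
  have h1 : p ^ E ≤ n := Int.le_of_dvd (by omega) hd
  have h2 : (2 : Int) ^ E ≤ p ^ E := pow_le_pow_left₀ (by norm_num) hp E
  have h3 : (E : Int) < 2 ^ E := by exact_mod_cast Nat.lt_two_pow_self (n := E)
  omega

lemma prime_two_int : Prime (2 : Int) := Int.prime_two
lemma prime_three_int : Prime (3 : Int) := Int.prime_three
lemma prime_five_int : Prime (5 : Int) := by
  rw [Int.prime_iff_natAbs_prime]; norm_num
lemma prime_seven_int : Prime (7 : Int) := by
  rw [Int.prime_iff_natAbs_prime]; norm_num

lemma not_dvd_mul (p : Int) (hp : Prime p) {x y : Int} (hx : ¬ p ∣ x) (hy : ¬ p ∣ y) :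
    ¬ p ∣ x * y := fun h => (hp.dvd_mul.mp h).elim hx hy

lemma not_dvd_pow' (p q : Int) (hp : Prime p) (hq : ¬ p ∣ q) (e : Nat) : ¬ p ∣ q ^ e :=
  fun h => hq (hp.dvd_of_dvd_pow h)

lemma dvd_shift (p : Int) (_hp : Prime p) (e : Nat) (X : Int) (hX : ¬ p ∣ X) :
    p ∣ p ^ e * X ↔ e ≠ 0 := by
  constructor
  · intro h he
    subst he
    simp at h
    exact hX h
  · intro he
    exact Dvd.dvd.mul_right (dvd_pow_self p he) X

-- which primes divide 2^a·3^b·5^c·7^d·r (r coprime to all four)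
lemma pvDvd2 (a b c d : Nat) (r : Int) (h2 : ¬ (2:Int) ∣ r) (h3 : ¬ (3:Int) ∣ r)
    (h5 : ¬ (5:Int) ∣ r) (h7 : ¬ (7:Int) ∣ r) :
    ((2:Int) ∣ 2^a*3^b*5^c*7^d*r ↔ a ≠ 0) ∧ ((3:Int) ∣ 2^a*3^b*5^c*7^d*r ↔ b ≠ 0) ∧
    ((5:Int) ∣ 2^a*3^b*5^c*7^d*r ↔ c ≠ 0) ∧ ((7:Int) ∣ 2^a*3^b*5^c*7^d*r ↔ d ≠ 0) := by
  refine ⟨?_, ?_, ?_, ?_⟩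
  · have heq : (2:Int)^a*3^b*5^c*7^d*r = 2^a * (3^b*5^c*7^d*r) := by ring
    rw [heq]
    exact dvd_shift 2 prime_two_int a _
      (not_dvd_mul 2 prime_two_int
        (not_dvd_mul 2 prime_two_int
          (not_dvd_mul 2 prime_two_int (not_dvd_pow' 2 3 prime_two_int (by decide) b)
            (not_dvd_pow' 2 5 prime_two_int (by decide) c))
          (not_dvd_pow' 2 7 prime_two_int (by decide) d)) h2)
  · have heq : (2:Int)^a*3^b*5^c*7^d*r = 3^b * (2^a*5^c*7^d*r) := by ring
    rw [heq]
    exact dvd_shift 3 prime_three_int b _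
      (not_dvd_mul 3 prime_three_int
        (not_dvd_mul 3 prime_three_int
          (not_dvd_mul 3 prime_three_int (not_dvd_pow' 3 2 prime_three_int (by decide) a)
            (not_dvd_pow' 3 5 prime_three_int (by decide) c))
          (not_dvd_pow' 3 7 prime_three_int (by decide) d)) h3)
  · have heq : (2:Int)^a*3^b*5^c*7^d*r = 5^c * (2^a*3^b*7^d*r) := by ring
    rw [heq]
    exact dvd_shift 5 prime_five_int c _
      (not_dvd_mul 5 prime_five_int
        (not_dvd_mul 5 prime_five_int
          (not_dvd_mul 5 prime_five_int (not_dvd_pow' 5 2 prime_five_int (by decide) a)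
            (not_dvd_pow' 5 3 prime_five_int (by decide) b))
          (not_dvd_pow' 5 7 prime_five_int (by decide) d)) h5)
  · have heq : (2:Int)^a*3^b*5^c*7^d*r = 7^d * (2^a*3^b*5^c*r) := by ring
    rw [heq]
    exact dvd_shift 7 prime_seven_int d _
      (not_dvd_mul 7 prime_seven_int
        (not_dvd_mul 7 prime_seven_int
          (not_dvd_mul 7 prime_seven_int (not_dvd_pow' 7 2 prime_seven_int (by decide) a)
            (not_dvd_pow' 7 3 prime_seven_int (by decide) b))
          (not_dvd_pow' 7 5 prime_seven_int (by decide) c)) h7)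

lemma pvLayer_eq (a b c d : Nat) (r : Int) (h2 : ¬ (2:Int) ∣ r) (h3 : ¬ (3:Int) ∣ r)
    (h5 : ¬ (5:Int) ∣ r) (h7 : ¬ (7:Int) ∣ r) :
    pvLayer (2^a*3^b*5^c*7^d*r) =
      (if a = 0 then 1 else 2) * (if b = 0 then 1 else 3) *
      (if c = 0 then 1 else 5) * (if d = 0 then 1 else 7) := by
  obtain ⟨i2, i3, i5, i7⟩ := pvDvd2 a b c d r h2 h3 h5 h7
  simp only [pvLayer, List.foldl_cons, List.foldl_nil, PySem.Int.mod_eq_zero_iff_dvd]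
  by_cases ha : a = 0 <;> by_cases hb : b = 0 <;> by_cases hc : c = 0 <;> by_cases hd : d = 0 <;>
    simp_all

-- one full execution of B's while-loop on a decomposed remainder
set_option maxHeartbeats 1000000 in
lemma pvRounds_spec : ∀ (s a b c d : Nat) (r : Int) (fuel : Nat),
    a + b + c + d ≤ s → 1 ≤ r →
    ¬ (2:Int) ∣ r → ¬ (3:Int) ∣ r → ¬ (5:Int) ∣ r → ¬ (7:Int) ∣ r →
    a ≤ fuel → b ≤ fuel → c ≤ fuel → d ≤ fuel →
    ∃ L, pvRounds fuel (2^a*3^b*5^c*7^d*r) = (L, r) ∧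
      L.countP (fun g => PySem.Int.mod g 2 = 0) = a ∧
      L.countP (fun g => PySem.Int.mod g 3 = 0) = b ∧
      L.countP (fun g => PySem.Int.mod g 5 = 0) = c ∧
      L.countP (fun g => PySem.Int.mod g 7 = 0) = d := by
  intro s
  induction s with
  | zero =>
    intro a b c d r fuel hs hr h2 h3 h5 h7 _ _ _ _
    have ha : a = 0 := by omega
    have hb : b = 0 := by omega
    have hc : c = 0 := by omega
    have hd : d = 0 := by omega
    subst ha; subst hb; subst hc; subst hd
    refine ⟨[], ?_, by simp, by simp, by simp, by simp⟩
    cases fuel with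
    | zero => simp [pvRounds]
    | succ f =>
      rw [pvRounds]
      rw [pvLayer_eq 0 0 0 0 r h2 h3 h5 h7]
      simp
  | succ s ih =>
    intro a b c d r fuel hs hr h2 h3 h5 h7 hfa hfb hfc hfd
    by_cases hall : a = 0 ∧ b = 0 ∧ c = 0 ∧ d = 0
    · obtain ⟨ha, hb, hc, hd⟩ := hall
      subst ha; subst hb; subst hc; subst hd
      refine ⟨[], ?_, by simp, by simp, by simp, by simp⟩
      cases fuel with
      | zero => simp [pvRounds]
      | succ f =>
        rw [pvRounds]
        rw [pvLayer_eq 0 0 0 0 r h2 h3 h5 h7]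
        simp
    · -- at least one exponent is positive: one round strips one factor of each dividing prime
      have hfuel : 1 ≤ fuel := by omega
      obtain ⟨f, rfl⟩ : ∃ f, fuel = f + 1 := ⟨fuel - 1, by omega⟩
      set g : Int := (if a = 0 then 1 else 2) * (if b = 0 then 1 else 3) *
        (if c = 0 then 1 else 5) * (if d = 0 then 1 else 7) with hg
      have hlayer := pvLayer_eq a b c d r h2 h3 h5 h7
      have hgpos : 0 < g := by
        rw [hg]; split_ifs <;> norm_num
      have hgne : g ≠ 1 := by
        rw [hg]
        by_cases ha : a = 0 <;> by_cases hb : b = 0 <;> by_cases hc : c = 0 <;>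
          by_cases hd : d = 0
        · exact absurd ⟨ha, hb, hc, hd⟩ hall
        all_goals norm_num [ha, hb, hc, hd]
      have hsplit : (2:Int)^a*3^b*5^c*7^d*r = g * (2^(a-1)*3^(b-1)*5^(c-1)*7^(d-1)*r) := by
        rw [hg]
        have e2 : (2:Int)^a = (if a = 0 then 1 else 2) * 2^(a-1) := by
          by_cases ha : a = 0
          · simp [ha]
          · rw [if_neg ha]
            obtain ⟨a', rfl⟩ : ∃ a', a = a' + 1 := ⟨a - 1, by omega⟩
            rw [Nat.add_sub_cancel, pow_succ]; ring
        have e3 : (3:Int)^b = (if b = 0 then 1 else 3) * 3^(b-1) := by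
          by_cases hb : b = 0
          · simp [hb]
          · rw [if_neg hb]
            obtain ⟨b', rfl⟩ : ∃ b', b = b' + 1 := ⟨b - 1, by omega⟩
            rw [Nat.add_sub_cancel, pow_succ]; ring
        have e5 : (5:Int)^c = (if c = 0 then 1 else 5) * 5^(c-1) := by
          by_cases hc : c = 0
          · simp [hc]
          · rw [if_neg hc]
            obtain ⟨c', rfl⟩ : ∃ c', c = c' + 1 := ⟨c - 1, by omega⟩
            rw [Nat.add_sub_cancel, pow_succ]; ring
        have e7 : (7:Int)^d = (if d = 0 then 1 else 7) * 7^(d-1) := by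
          by_cases hd : d = 0
          · simp [hd]
          · rw [if_neg hd]
            obtain ⟨d', rfl⟩ : ∃ d', d = d' + 1 := ⟨d - 1, by omega⟩
            rw [Nat.add_sub_cancel, pow_succ]; ring
        calc (2:Int)^a*3^b*5^c*7^d*r
            = ((if a = 0 then 1 else 2) * 2^(a-1)) * ((if b = 0 then 1 else 3) * 3^(b-1)) *
              ((if c = 0 then 1 else 5) * 5^(c-1)) * ((if d = 0 then 1 else 7) * 7^(d-1)) * r := by
              rw [← e2, ← e3, ← e5, ← e7]
          _ = _ := by ring
      have hdiv : PySem.Int.floordiv (2^a*3^b*5^c*7^d*r) g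
          = 2^(a-1)*3^(b-1)*5^(c-1)*7^(d-1)*r := by
        rw [hsplit, PySem.Int.floordiv_eq_ediv_of_pos hgpos]
        exact Int.mul_ediv_cancel_left _ hgpos.ne'
      obtain ⟨L, hL, c2, c3, c5, c7⟩ :=
        ih (a-1) (b-1) (c-1) (d-1) r f (by omega) hr h2 h3 h5 h7
          (by omega) (by omega) (by omega) (by omega)
      refine ⟨g :: L, ?_, ?_, ?_, ?_, ?_⟩
      · rw [pvRounds]
        simp only [hlayer, ← hg]
        rw [if_neg hgne, hdiv, hL]
      · rw [List.countP_cons, c2]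
        have : (PySem.Int.mod g 2 = 0) ↔ a ≠ 0 := by
          rw [PySem.Int.mod_eq_zero_iff_dvd, hg]
          by_cases ha : a = 0 <;> by_cases hb : b = 0 <;> by_cases hc : c = 0 <;>
            by_cases hd : d = 0 <;> simp [ha, hb, hc, hd]
        by_cases hx : PySem.Int.mod g 2 = 0
        · have ha := this.mp hx
          simp only [hx]
          simp
          omega
        · have ha : a = 0 := by by_contra hcon; exact hx (this.mpr hcon)
          simp only [decide_eq_false hx]
          simp [ha]
      · rw [List.countP_cons, c3]
        have : (PySem.Int.mod g 3 = 0) ↔ b ≠ 0 := by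
          rw [PySem.Int.mod_eq_zero_iff_dvd, hg]
          by_cases ha : a = 0 <;> by_cases hb : b = 0 <;> by_cases hc : c = 0 <;>
            by_cases hd : d = 0 <;> simp [ha, hb, hc, hd]
        by_cases hx : PySem.Int.mod g 3 = 0
        · have hb := this.mp hx
          simp only [hx]
          simp
          omega
        · have hb : b = 0 := by by_contra hcon; exact hx (this.mpr hcon)
          simp only [decide_eq_false hx]
          simp [hb]
      · rw [List.countP_cons, c5]
        have : (PySem.Int.mod g 5 = 0) ↔ c ≠ 0 := by
          rw [PySem.Int.mod_eq_zero_iff_dvd, hg]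
          by_cases ha : a = 0 <;> by_cases hb : b = 0 <;> by_cases hc : c = 0 <;>
            by_cases hd : d = 0 <;> simp [ha, hb, hc, hd]
        by_cases hx : PySem.Int.mod g 5 = 0
        · have hc := this.mp hx
          simp only [hx]
          simp
          omega
        · have hc : c = 0 := by by_contra hcon; exact hx (this.mpr hcon)
          simp only [decide_eq_false hx]
          simp [hc]
      · rw [List.countP_cons, c7]
        have : (PySem.Int.mod g 7 = 0) ↔ d ≠ 0 := by
          rw [PySem.Int.mod_eq_zero_iff_dvd, hg]
          by_cases ha : a = 0 <;> by_cases hb : b = 0 <;> by_cases hc : c = 0 <;>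
            by_cases hd : d = 0 <;> simp [ha, hb, hc, hd]
        by_cases hx : PySem.Int.mod g 7 = 0
        · have hd := this.mp hx
          simp only [hx]
          simp
          omega
        · have hd : d = 0 := by by_contra hcon; exact hx (this.mpr hcon)
          simp only [decide_eq_false hx]
          simp [hd]

-- ===== VERDICT (by name: the statement is the Claim_ definition above) =====
theorem factorize_7smooth_spec : Claim_equal_factorize_7smooth := by
  intro n _
  unfold Spec_factorize_7smooth factorize_7smooth factorize_7smooth_alt
  by_cases h0 : n ≤ 0
  · rw [if_pos h0, if_pos h0]
  · rw [if_neg h0, if_neg h0]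
    by_cases h1 : n = 1
    · subst h1; decide
    · rw [if_neg h1]
      have hn1 : 1 ≤ n := by omega
      obtain ⟨a, r1, hn_eq, hr1, h2r1⟩ := exists_decomp 2 Nat.prime_two n hn1
      obtain ⟨b, r2, hr1_eq, hr2, h3r2⟩ := exists_decomp 3 Nat.prime_three r1 hr1
      obtain ⟨c, r3, hr2_eq, hr3, h5r3⟩ := exists_decomp 5 (by norm_num) r2 hr2
      obtain ⟨d, r4, hr3_eq, hr4, h7r4⟩ := exists_decomp 7 (by norm_num) r3 hr3
      push_cast at hn_eq hr1_eq hr2_eq hr3_eq h2r1 h3r2 h5r3 h7r4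
      have hfull : n = 2^a*3^b*5^c*7^d*r4 := by
        rw [hn_eq, hr1_eq, hr2_eq, hr3_eq]; ring
      -- r4 is coprime to all four primes
      have h2r4 : ¬ (2:Int) ∣ r4 := fun h =>
        h2r1 (by rw [hr1_eq, hr2_eq, hr3_eq]; exact Dvd.dvd.mul_left (Dvd.dvd.mul_left (Dvd.dvd.mul_left h _) _) _)
      have h3r4 : ¬ (3:Int) ∣ r4 := fun h =>
        h3r2 (by rw [hr2_eq, hr3_eq]; exact Dvd.dvd.mul_left (Dvd.dvd.mul_left h _) _)
      have h5r4 : ¬ (5:Int) ∣ r4 := fun h =>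
        h5r3 (by rw [hr3_eq]; exact Dvd.dvd.mul_left h _)
      -- A side: unfold the fold and apply the strip lemma four times
      have s1 : pvStripA 2 n.natAbs (PySem.Dict.empty, n) = (pvIter 2 a PySem.Dict.empty, r1) := by
        rw [hn_eq]
        exact pvStripA_spec 2 le_rfl r1 hr1 h2r1 a _ _ (fuel_gt 2 le_rfl r1 hr1 a)
      have s2 : pvStripA 3 r1.natAbs (pvIter 2 a PySem.Dict.empty, r1)
          = (pvIter 3 b (pvIter 2 a PySem.Dict.empty), r2) := by
        rw [hr1_eq]
        exact pvStripA_spec 3 (by norm_num) r2 hr2 h3r2 b _ _ (fuel_gt 3 (by norm_num) r2 hr2 b)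
      have s3 : pvStripA 5 r2.natAbs (pvIter 3 b (pvIter 2 a PySem.Dict.empty), r2)
          = (pvIter 5 c (pvIter 3 b (pvIter 2 a PySem.Dict.empty)), r3) := by
        rw [hr2_eq]
        exact pvStripA_spec 5 (by norm_num) r3 hr3 h5r3 c _ _ (fuel_gt 5 (by norm_num) r3 hr3 c)
      have s4 : pvStripA 7 r3.natAbs (pvIter 5 c (pvIter 3 b (pvIter 2 a PySem.Dict.empty)), r3)
          = (pvIter 7 d (pvIter 5 c (pvIter 3 b (pvIter 2 a PySem.Dict.empty))), r4) := by
        rw [hr3_eq]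
        exact pvStripA_spec 7 (by norm_num) r4 hr4 h7r4 d _ _ (fuel_gt 7 (by norm_num) r4 hr4 d)
      -- B side: the layer-peeling loop collects max-exponent many layers and ends at r4
      have hfa : a ≤ n.natAbs := exp_le_natAbs 2 le_rfl n hn1 a ⟨3^b*5^c*7^d*r4, by rw [hfull]; ring⟩
      have hfb : b ≤ n.natAbs := exp_le_natAbs 3 (by norm_num) n hn1 b ⟨2^a*5^c*7^d*r4, by rw [hfull]; ring⟩
      have hfc : c ≤ n.natAbs := exp_le_natAbs 5 (by norm_num) n hn1 c ⟨2^a*3^b*7^d*r4, by rw [hfull]; ring⟩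
      have hfd : d ≤ n.natAbs := exp_le_natAbs 7 (by norm_num) n hn1 d ⟨2^a*3^b*5^c*r4, by rw [hfull]; ring⟩
      obtain ⟨L, hL, c2, c3, c5, c7⟩ :=
        pvRounds_spec (a+b+c+d) a b c d r4 n.natAbs le_rfl hr4 h2r4 h3r4 h5r4 h7r4 hfa hfb hfc hfd
      rw [← hfull] at hL
      simp only [List.foldl_cons, List.foldl_nil, s1, s2, s3, s4, hL, c2, c3, c5, c7]
      by_cases hr : r4 = 1
      · rw [if_neg (by simpa using hr), if_neg (by simpa using hr)]
        -- both dicts are the inserts of (p, vₚ(n)) for the nonzero exponents, in prime order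
        simp only [pvIter_closed]
        congr 1
        by_cases ha : a = 0 <;> by_cases hb : b = 0 <;> by_cases hc : c = 0 <;>
          by_cases hd' : d = 0 <;>
            simp [ha, hb, hc, hd', PySem.Dict.getD_insert, PySem.Dict.getD_empty]
      · rw [if_pos (by simpa using hr), if_pos (by simpa using hr)]
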